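-- pv_equiv track=rewrite | github.com/Marytem/UCU_Courses | programming_basics/дз3/hw3_Maryana_Temnyk.py | find_union
-- ===== SOURCE A (Python) =====
-- def find_union(s1, s2):
--     """
--     (str, str) -> str
--     Find and return string of all letters in alphabetic order that
--     are present at least in one of strings. If arguments aren't strings,
--     function should return None.
--
--     >>> find_union("aaabb", "bbbbccc")
--     'abc'
--     >>> find_union("aZAbc", "zzYYxp")
--     'abcpxyz'
--     >>> find_union("sfdfsdf", 2015)
--
--     """
--     from string import ascii_lowercase
--     if type(s1) is str and type(s2) is str:
--         s1 = s1.lower()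
--         s2 = s2.lower()
--         a = ''
--         for i in range(26):
--             if s1.find(ascii_lowercase[i]) >= 0\
--                 or s2.find(ascii_lowercase[i]) >= 0:
--                 a += ascii_lowercase[i]
--         return a
--     else:
--         return None
-- ===== SOURCE B (Python) =====
-- def find_union(s1, s2):
--     from string import ascii_lowercase
--     if type(s1) is str and type(s2) is str:
--         combined = set(s1.lower()) | set(s2.lower())
--         return ''.join(sorted(combined & set(ascii_lowercase)))
--     else:
--         return None
-- ===== Notes on version B (the rewrite author's own statement) =====
-- stated objective: idiomatic
-- what changed: Replaces A's fixed scan over the 26-letter alphabet with str.find against each string by building a set union of the strings' lowered characters, intersecting with the ascii_lowercase set, and joining the sorted result.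
import Mathlib
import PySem

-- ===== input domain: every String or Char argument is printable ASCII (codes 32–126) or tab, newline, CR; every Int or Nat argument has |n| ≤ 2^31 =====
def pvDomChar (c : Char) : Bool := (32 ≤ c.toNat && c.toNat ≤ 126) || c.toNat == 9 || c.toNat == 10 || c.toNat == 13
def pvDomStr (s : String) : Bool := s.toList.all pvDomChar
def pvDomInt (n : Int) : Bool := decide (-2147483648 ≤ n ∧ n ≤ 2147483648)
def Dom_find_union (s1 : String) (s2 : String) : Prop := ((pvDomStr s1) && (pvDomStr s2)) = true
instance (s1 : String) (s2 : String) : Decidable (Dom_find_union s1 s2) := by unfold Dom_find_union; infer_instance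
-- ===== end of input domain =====

-- B replaces A's scan of the 26-letter alphabet with str.find by a set union of the
-- actual characters intersected with the alphabet, then sorted (objective: idiomatic).


-- ===== PORT A =====
-- ascii_lowercase
def pvAlphabet : List Char := "abcdefghijklmnopqrstuvwxyz".toList

-- In Lean both arguments are Strings, so Python's `type(...) is str` guard is always
-- true and the `else: return None` branch is unreachable; the result is `some …`.
def find_union (s1 : String) (s2 : String) : Option String :=
  let t1 := PySem.Chars.lower s1.toList
  let t2 := PySem.Chars.lower s2.toList
  let a := (PySem.List.pyRange 0 26).foldl (fun a i =>
      if PySem.Chars.find t1 [PySem.List.pyGetD pvAlphabet i ' '] ≥ 0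
          ∨ PySem.Chars.find t2 [PySem.List.pyGetD pvAlphabet i ' '] ≥ 0
      then a ++ [PySem.List.pyGetD pvAlphabet i ' '] else a) []
  some (String.mk a)

-- ===== PORT B =====
def find_union_alt (s1 : String) (s2 : String) : Option String :=
  let combined := PySem.Set.union (PySem.Set.ofList (PySem.Chars.lower s1.toList))
                                  (PySem.Set.ofList (PySem.Chars.lower s2.toList))
  some (String.mk (PySem.List.sorted (PySem.Set.inter combined (PySem.Set.ofList pvAlphabet)) (fun c => c)))

-- ===== PRECONDITION & SPEC =====
def Spec_find_union (s1 : String) (s2 : String) (out : Option String) : Prop := out = find_union_alt s1 s2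
instance (s1 : String) (s2 : String) (out : Option String) : Decidable (Spec_find_union s1 s2 out) := by unfold Spec_find_union; infer_instance

-- ===== CLAIM (what is proved, stated in full; the proofs are below) =====
def Claim_equal_find_union : Prop := ∀ (s1 : String) (s2 : String), Dom_find_union s1 s2 → Spec_find_union s1 s2 (find_union s1 s2)

-- ===== LEMMAS AND PROOFS =====

-- s.find(c) >= 0 for a single character c is exactly membership
theorem pv_find_ge_zero_iff (t : List Char) (c : Char) :
    PySem.Chars.find t [c] ≥ 0 ↔ c ∈ t := by
  have h1 := PySem.Chars.neg_one_le_find t [c]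
  have h2 := PySem.Chars.find_eq_neg_one_iff t [c]
  have h3 : [c] <:+: t ↔ c ∈ t := by
    constructor
    · intro h; exact h.mem (List.mem_singleton_self c)
    · intro h
      rcases List.mem_iff_append.mp h with ⟨p, q, rfl⟩
      exact ⟨p, q, by simp⟩
  constructor
  · intro h
    by_contra hc
    have := h2.mpr (fun hi => hc (h3.mp hi))
    omega
  · intro h
    rcases lt_or_ge (PySem.Chars.find t [c]) 0 with hlt | hge
    · exact absurd (h2.mp (by omega)) (fun hn => hn (h3.mpr h))
    · exact hge

-- A's alphabet scan computes the filter of the alphabet by membership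
theorem pv_A_char (t1 t2 : List Char) :
    ((PySem.List.pyRange 0 26).foldl (fun a i =>
        if PySem.Chars.find t1 [PySem.List.pyGetD pvAlphabet i ' '] ≥ 0
            ∨ PySem.Chars.find t2 [PySem.List.pyGetD pvAlphabet i ' '] ≥ 0
        then a ++ [PySem.List.pyGetD pvAlphabet i ' '] else a) [])
    = pvAlphabet.filter (fun c => decide (c ∈ t1 ∨ c ∈ t2)) := by
  simp only [pv_find_ge_zero_iff]
  have h26 : (26 : Int) = PySem.List.len pvAlphabet := by decide
  rw [h26]
  have h := PySem.List.foldl_pyRange_pyGetD pvAlphabet ' '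
      (fun a c => if c ∈ t1 ∨ c ∈ t2 then a ++ [c] else a) ([] : List Char)
      (le_refl (0 : Int))
  refine h.trans ?_
  have h2 := PySem.List.foldl_append_if (fun c => decide (c ∈ t1 ∨ c ∈ t2)) id pvAlphabet ([] : List Char)
  simp only [decide_eq_true_eq, List.map_id, List.nil_append, id] at h2
  simpa using h2

-- B's sorted intersection is the same filter
theorem pv_B_char (t1 t2 : List Char) :
    PySem.List.sorted (PySem.Set.inter (PySem.Set.union (PySem.Set.ofList t1) (PySem.Set.ofList t2))
        (PySem.Set.ofList pvAlphabet)) (fun c => c)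
    = pvAlphabet.filter (fun c => decide (c ∈ t1 ∨ c ∈ t2)) := by
  apply PySem.List.sorted_eq_of_perm_of_pairwise_lt
  · apply (List.perm_ext_iff_of_nodup ?_ ?_).mpr
    · intro c
      simp [PySem.Set.mem_inter, PySem.Set.mem_union, PySem.Set.mem_ofList, List.mem_filter]
      tauto
    · exact List.Nodup.filter _ (by decide)
    · exact PySem.Set.nodup_inter _ _ (PySem.Set.nodup_union _ _ (PySem.Set.nodup_ofList t1))
  · exact List.Pairwise.filter _ (by decide : pvAlphabet.Pairwise (· < ·))

-- ===== VERDICT (by name: the statement is the Claim_ definition above) =====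
theorem find_union_spec : Claim_equal_find_union := by
  intro s1 s2 _
  unfold Spec_find_union find_union find_union_alt
  simp only [pv_A_char, pv_B_char]
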